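-- pv_equiv track=rewrite | github.com/Nick-Mur/Programming | src/lab3/sudoku.py | group_values
-- ===== SOURCE A (Python) =====
-- import typing as tp
--
-- T = tp.TypeVar("T")
--
-- def group_values(values: tp.List[T], group_size: int) -> tp.List[tp.List[T]]:
--     """
--     Сгруппировать значения values в список, состоящий из списков по group_size элементов.
--
--     Args:
--         values (List[T]): Список значений для группировки.
--         group_size (int): Размер каждой группы.
--
--     Returns:
--         List[List[T]]: Список сгруппированных значений.
--
--     Raises:
--         ValueError: Если group_size не является положительным целым числом.
--     """
--     if not isinstance(group_size, int) or group_size <= 0: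
--         raise ValueError(
--             "Размер группы group_size должен быть положительным целым числом."
--         )
--     return [
--         values[i: i + group_size] for i in range(0, len(values), group_size)
--     ]
-- ===== SOURCE B (Python) =====
-- import typing as tp
--
-- T = tp.TypeVar("T")
--
-- def group_values(values: tp.List[T], group_size: int) -> tp.List[tp.List[T]]:
--     if not isinstance(group_size, int) or group_size <= 0:
--         raise ValueError(
--             "Размер группы group_size должен быть положительным целым числом."
--         )
--     result = []
--     current = []
--     for x in values:
--         current.append(x)
--         if len(current) == group_size:
--             result.append(current)
--             current = []
--     if current:
--         result.append(current)
--     return result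
-- ===== Notes on version B (the rewrite author's own statement) =====
-- stated objective: alternative
-- what changed: Replaces the strided-index comprehension with repeated slicing by a single element-wise pass that accumulates a current group and flushes it when full, appending the final partial group after the loop.
import Mathlib
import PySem

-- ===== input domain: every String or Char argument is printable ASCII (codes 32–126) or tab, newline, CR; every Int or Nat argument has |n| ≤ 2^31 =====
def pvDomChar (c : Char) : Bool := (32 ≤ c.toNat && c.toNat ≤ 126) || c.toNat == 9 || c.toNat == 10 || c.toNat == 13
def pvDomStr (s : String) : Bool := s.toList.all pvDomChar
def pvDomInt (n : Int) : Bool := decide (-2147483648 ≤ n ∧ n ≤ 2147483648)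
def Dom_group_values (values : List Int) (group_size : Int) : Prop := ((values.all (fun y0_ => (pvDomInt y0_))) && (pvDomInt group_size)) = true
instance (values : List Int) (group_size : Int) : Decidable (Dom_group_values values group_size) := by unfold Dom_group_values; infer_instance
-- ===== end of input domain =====

-- B replaces A's strided-index comprehension over slices by a single element-wise
-- accumulate-and-flush pass (alternative decomposition, same cost).


-- ===== PORT A =====
-- [values[i : i + group_size] for i in range(0, len(values), group_size)]
def group_values (values : List Int) (group_size : Int) : List (List Int) :=
  (PySem.List.pyRange 0 values.length group_size).map
    (fun i => PySem.List.slice values (some i) (some (i + group_size)))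

-- ===== PORT B =====
-- fold over the elements, accumulating (result, current); flush current when full,
-- append the final partial group after the loop.
def group_values_alt (values : List Int) (group_size : Int) : List (List Int) :=
  let st := values.foldl
    (fun (st : List (List Int) × List Int) x =>
      if ((st.2 ++ [x]).length : Int) == group_size then (st.1 ++ [st.2 ++ [x]], [])
      else (st.1, st.2 ++ [x]))
    ([], [])
  if st.2.isEmpty then st.1 else st.1 ++ [st.2]

-- ===== PRECONDITION & SPEC =====
-- A raises ValueError when group_size ≤ 0.
def Pre_group_values (values : List Int) (group_size : Int) : Prop := 0 < group_size
instance (values : List Int) (group_size : Int) : Decidable (Pre_group_values values group_size) := by unfold Pre_group_values; infer_instance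
def pvWitness_group_values : List Int × Int := ([1, 2, 3, 4, 5], 2)
def Spec_group_values (values : List Int) (group_size : Int) (out : List (List Int)) : Prop := out = group_values_alt values group_size
instance (values : List Int) (group_size : Int) (out : List (List Int)) : Decidable (Spec_group_values values group_size out) := by unfold Spec_group_values; infer_instance

-- ===== CLAIM (what is proved, stated in full; the proofs are below) =====
def Claim_equal_group_values : Prop := ∀ (values : List Int) (group_size : Int), Dom_group_values values group_size → Pre_group_values values group_size → Spec_group_values values group_size (group_values values group_size)

-- ===== LEMMAS AND PROOFS =====

-- Reference chunking function: head group of n, recurse on the rest.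
def chunksRef (n : Nat) : List Int → List (List Int)
  | [] => []
  | x :: xs => (x :: xs.take (n - 1)) :: chunksRef n (xs.drop (n - 1))
termination_by xs => xs.length
decreasing_by simp

-- B's loop with the trailing flush, output built in front (structural mirror of B's state machine).
def chunksAux (g : Int) : List Int → List Int → List (List Int)
  | [], cur => if cur.isEmpty then [] else [cur]
  | x :: xs, cur =>
      if ((cur ++ [x]).length : Int) == g then (cur ++ [x]) :: chunksAux g xs []
      else chunksAux g xs (cur ++ [x])

lemma B_fold (g : Int) : ∀ (xs : List Int) (res : List (List Int)) (cur : List Int),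
    (let st := xs.foldl
      (fun (st : List (List Int) × List Int) x =>
        if ((st.2 ++ [x]).length : Int) == g then (st.1 ++ [st.2 ++ [x]], [])
        else (st.1, st.2 ++ [x]))
      (res, cur);
     if st.2.isEmpty then st.1 else st.1 ++ [st.2]) = res ++ chunksAux g xs cur := by
  intro xs
  induction xs with
  | nil =>
      intro res cur
      simp only [List.foldl_nil, chunksAux]
      by_cases h : cur.isEmpty
      · simp [h]
      · simp [h]
  | cons x xs ih =>
      intro res cur
      simp only [List.foldl_cons, chunksAux]
      by_cases h : (((cur ++ [x]).length : Int) == g) = true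
      · rw [if_pos h, if_pos h, ih]
        simp
      · rw [if_neg h, if_neg h, ih]

lemma chunksRef_nil (n : Nat) : chunksRef n [] = [] := by rw [chunksRef]

lemma chunksRef_cons (n : Nat) (x : Int) (xs : List Int) :
    chunksRef n (x :: xs) = (x :: xs.take (n - 1)) :: chunksRef n (xs.drop (n - 1)) := by
  rw [chunksRef]

lemma chunksRef_full (n : Nat) (hn : 0 < n) (c ys : List Int) (hc : c.length = n) :
    chunksRef n (c ++ ys) = c :: chunksRef n ys := by
  match c with
  | [] => simp at hc; omega
  | a :: as =>
      have hlen : as.length = n - 1 := by simp at hc; omega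
      rw [List.cons_append, chunksRef_cons,
          List.take_append_of_le_length (by omega), List.take_of_length_le (by omega),
          List.drop_append_of_le_length (by omega), List.drop_eq_nil_of_le (by omega),
          List.nil_append]

lemma chunksAux_eq (g : Int) (hg : 0 < g) : ∀ (xs cur : List Int),
    cur.length < g.toNat → chunksAux g xs cur = chunksRef g.toNat (cur ++ xs) := by
  intro xs
  induction xs with
  | nil =>
      intro cur hcur
      match cur with
      | [] => simp [chunksAux, chunksRef_nil]
      | y :: ys =>
          simp only [chunksAux, List.isEmpty_cons, Bool.false_eq_true, if_false,
            List.append_nil]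
          rw [chunksRef_cons, List.take_of_length_le (by simp at hcur; omega),
              List.drop_eq_nil_of_le (by simp at hcur; omega), chunksRef_nil]
  | cons x xs ih =>
      intro cur hcur
      simp only [chunksAux]
      by_cases h : ((((cur ++ [x]).length : Int)) == g) = true
      · have hfull : (cur ++ [x]).length = g.toNat := by
          have := beq_iff_eq.mp h; omega
        rw [if_pos h, ih [] (by simpa using hg), List.nil_append,
            show cur ++ x :: xs = (cur ++ [x]) ++ xs by simp,
            chunksRef_full g.toNat (by omega) _ _ hfull]
      · have hne : (cur ++ [x]).length ≠ g.toNat := by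
          intro e; apply h; rw [beq_iff_eq]; omega
        rw [if_neg h, ih (cur ++ [x]) (by simp at hne hcur ⊢; omega)]
        simp

lemma A_step (g : Int) (hg : 0 < g) (x : Int) (xs : List Int) :
    group_values (x :: xs) g
      = (x :: xs).take g.toNat :: group_values ((x :: xs).drop g.toNat) g := by
  have hgn : ((g.toNat : Int)) = g := Int.toNat_of_nonneg hg.le
  unfold group_values
  rw [PySem.List.pyRange_of_pos _ _ hg, PySem.List.pyRange_of_pos _ _ hg]
  set L : Nat := (x :: xs).length with hL
  have hLpos : 0 < L := by simp [hL]
  have hL' : ((x :: xs).drop g.toNat).length = L - g.toNat := by simp [hL]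
  -- counts
  have hq0 : (0:Int) ≤ ((L:Int) - 1) / g := Int.ediv_nonneg (by omega) hg.le
  have hcnt : ((L:Int) - 0 + g - 1) / g = ((L:Int) - 1) / g + 1 := by
    rw [show ((L:Int) - 0 + g - 1) = ((L:Int) - 1) + 1 * g by ring,
        Int.add_mul_ediv_right _ _ (by omega)]
  have hm : (if (0:Int) < (((x :: xs).drop g.toNat).length : Int)
        then (((((x :: xs).drop g.toNat).length : Int) - 0 + g - 1) / g).toNat else 0)
      = (((L:Int) - 1) / g).toNat := by
    by_cases hlt : g.toNat < L
    · rw [if_pos (by rw [hL']; omega)]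
      congr 1
      rw [show ((((x :: xs).drop g.toNat).length : Int)) = (L:Int) - g by rw [hL']; omega]
      congr 1; ring
    · rw [if_neg (by rw [hL']; omega)]
      have : ((L:Int) - 1) / g = 0 := Int.ediv_eq_zero_of_lt (by omega) (by omega)
      omega
  rw [if_pos (by exact_mod_cast hLpos), hm, hcnt,
      show (((L:Int) - 1) / g + 1).toNat = (((L:Int) - 1) / g).toNat + 1 by omega,
      List.range_succ_eq_map]
  simp only [List.map_cons, List.map_map]
  congr 1
  · -- head slice = take
    rw [show (0:Int) + g * (0:Nat) = 0 by simp,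
        PySem.List.slice_toNat _ le_rfl (by omega)]
    simp
  · -- tail slices shift by one group
    apply List.map_congr_left
    intro k hk
    simp only [Function.comp, Nat.succ_eq_add_one, zero_add]
    push_cast
    rw [show g * ((k:Int) + 1) = g * k + g from by ring]
    have h1 : (0:Int) ≤ g * k := by positivity
    set t : Int := g * k with ht
    rw [PySem.List.slice_toNat _ (by omega) (by omega),
        PySem.List.slice_toNat _ (by omega) (by omega),
        List.drop_drop]
    congr 1
    · omega
    · congr 1
      omega

-- A equals the reference chunking, by strong induction on the list length.
lemma A_eq (g : Int) (hg : 0 < g) : ∀ (N : Nat) (xs : List Int), xs.length ≤ N →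
    group_values xs g = chunksRef g.toNat xs := by
  intro N
  induction N with
  | zero =>
      intro xs hxs
      match xs with
      | [] => simp [group_values, chunksRef_nil, PySem.List.pyRange_of_pos _ _ hg]
      | _ :: _ => simp at hxs
  | succ N ih =>
      intro xs hxs
      match xs with
      | [] => simp [group_values, chunksRef_nil, PySem.List.pyRange_of_pos _ _ hg]
      | x :: xs =>
          rw [A_step g hg, ih _ (by simp at hxs ⊢; omega), chunksRef_cons,
              show (x :: xs).take g.toNat = x :: xs.take (g.toNat - 1) by
                rw [show g.toNat = (g.toNat - 1) + 1 by omega]; simp,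
              show (x :: xs).drop g.toNat = xs.drop (g.toNat - 1) by
                rw [show g.toNat = (g.toNat - 1) + 1 by omega]; simp]

-- ===== VERDICT (by name: the statement is the Claim_ definition above) =====
theorem group_values_spec : Claim_equal_group_values := by
  intro values g _ hg
  unfold Spec_group_values group_values_alt
  rw [B_fold g values [] [], List.nil_append, chunksAux_eq g hg values [] (by simpa using hg),
      List.nil_append, A_eq g hg values.length values le_rfl]
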